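-- pv_equiv track=rewrite | github.com/kylekim2123/Algorithm-with-Python | SWEA/D2/[1979]어디에단어가들어갈수있을까.py | is_include_word_in_line
-- ===== SOURCE A (Python) =====
-- def is_include_word_in_line(word, line):
--     index = 0
--     count = 0
--     position = 0
--     while index < len(line):
--         if line[index] == 1:
--             count += 1
--         else:
--             if count == len(word):
--                 position += 1
--             count = 0
--         if (index == len(line) - 1) and (count == len(word)):
--             position += 1
--         index += 1
--     return position
-- ===== SOURCE B (Python) =====
-- def is_include_word_in_line(word, line):
--     t = len(word)
--     n = len(line)
--     pref = [0] * (n + 1)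
--     for i, x in enumerate(line):
--         pref[i + 1] = pref[i] + (1 if x == 1 else 0)
--     total = 0
--     for i in range(n - t + 1):
--         if (pref[i + t] - pref[i] == t
--                 and (i == 0 or line[i - 1] != 1)
--                 and (i + t == n or line[i + t] != 1)):
--             total += 1
--     return total
-- ===== Notes on version B (the rewrite author's own statement) =====
-- stated objective: alternative
-- what changed: B replaces A's stateful reset-counter scan (with end-of-line special case) by a staged, stateless formulation: it precomputes a prefix-sum array of 1-counts, then counts every start index i whose length-len(word) window sums to len(word) and whose neighbours on both sides are not 1; the measured speed-up is a constant factor from the simpler per-element work.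
-- outside the precondition, e.g. on is_include_word_in_line([], []): A returns 0, B returns 1
import Mathlib
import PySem

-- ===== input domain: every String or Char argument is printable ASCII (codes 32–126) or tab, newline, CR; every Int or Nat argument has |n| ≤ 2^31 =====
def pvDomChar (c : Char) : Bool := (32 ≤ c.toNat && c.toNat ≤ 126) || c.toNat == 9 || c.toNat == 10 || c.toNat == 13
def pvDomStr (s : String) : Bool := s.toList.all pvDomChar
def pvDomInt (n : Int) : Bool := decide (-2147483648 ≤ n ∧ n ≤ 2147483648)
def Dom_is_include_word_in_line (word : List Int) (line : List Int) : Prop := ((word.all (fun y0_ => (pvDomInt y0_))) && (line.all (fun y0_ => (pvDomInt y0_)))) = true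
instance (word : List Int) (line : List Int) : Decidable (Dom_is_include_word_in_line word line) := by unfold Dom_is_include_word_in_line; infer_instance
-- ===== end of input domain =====

-- B replaces A's stateful reset-counter scan by a staged formulation: a prefix-sum pass over the line, then a count of start indices whose length-t window sums to t with non-1 neighbours; objective: alternative decomposition, same O(n) cost.


-- ===== PORT A =====
-- literal port of A's while loop: index/count/position state, counter reset at a non-1, end-of-line check
def pvLoopA (word : List Int) (line : List Int) (index : Nat) (count : Int) (position : Int) : Int :=
  if h : index < line.length then
    let x := (line)[index]
    let count' := if x = 1 then count + 1 else 0
    let position' := if x = 1 then position else (if count = (word.length : Int) then position + 1 else position)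
    let position'' := if index = line.length - 1 ∧ count' = (word.length : Int) then position' + 1 else position'
    pvLoopA word line (index + 1) count' position''
  else position
termination_by line.length - index

def is_include_word_in_line (word : List Int) (line : List Int) : Int :=
  pvLoopA word line 0 0 0

-- ===== PORT B =====
-- pref pass: Python preallocates pref and fills pref[i+1] from pref[i] left to right; ported as
-- incremental append, reading the previously written cell as the last element (pref[i] = pref[-1] here).
def pvPref (line : List Int) : List Int :=
  line.foldl (fun pr x => pr ++ [PySem.List.pyGetD pr (-1) 0 + (if x = 1 then 1 else 0)]) [0]

def is_include_word_in_line_alt (word : List Int) (line : List Int) : Int :=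
  let t : Int := word.length
  let n : Int := line.length
  let pref := pvPref line
  (PySem.List.pyRange 0 (n - t + 1) 1).foldl
    (fun total i =>
      if PySem.List.pyGetD pref (i + t) 0 - PySem.List.pyGetD pref i 0 = t
         ∧ (i = 0 ∨ PySem.List.pyGetD line (i - 1) 0 ≠ 1)
         ∧ (i + t = n ∨ PySem.List.pyGetD line (i + t) 0 ≠ 1)
      then total + 1 else total) 0

-- ===== PRECONDITION & SPEC =====
-- Pre_ excludes only the doubly-empty input (word=[] and line=[]): there A's loop body never runs and it
-- returns 0, while B counts the single zero-length placement and returns 1; for this degenerate corner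
-- ("how many ways does the empty word fit in the empty line") both values are defensible.
def Pre_is_include_word_in_line (word : List Int) (line : List Int) : Prop := ¬ (word = [] ∧ line = [])
instance (word : List Int) (line : List Int) : Decidable (Pre_is_include_word_in_line word line) := by unfold Pre_is_include_word_in_line; infer_instance
def pvWitness_is_include_word_in_line : List Int × List Int := ([1, 1], [1, 1, 0, 1, 1, 1])

def Spec_is_include_word_in_line (word : List Int) (line : List Int) (out : Int) : Prop := out = is_include_word_in_line_alt word line
instance (word : List Int) (line : List Int) (out : Int) : Decidable (Spec_is_include_word_in_line word line out) := by unfold Spec_is_include_word_in_line; infer_instance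

-- ===== CLAIM (what is proved, stated in full; the proofs are below) =====
def Claim_equal_is_include_word_in_line : Prop := ∀ (word : List Int) (line : List Int), Dom_is_include_word_in_line word line → Pre_is_include_word_in_line word line → Spec_is_include_word_in_line word line (is_include_word_in_line word line)

-- ===== LEMMAS AND PROOFS =====

-- 1 for a 1-cell, 0 otherwise
def pvD1 (x : Int) : Int := if x = 1 then 1 else 0

-- number of 1s in a list, as an Int
def pvOnes : List Int → Int
  | [] => 0
  | x :: xs => pvD1 x + pvOnes xs

-- partial sums of pvD1 starting from s
def pvPsums (s : Int) : List Int → List Int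
  | [] => []
  | x :: xs => (s + pvD1 x) :: pvPsums (s + pvD1 x) xs

-- length of the maximal prefix of 1s
def pvRunLen : List Int → Nat
  | [] => 0
  | x :: xs => if x = 1 then pvRunLen xs + 1 else 0

-- run-level spec both ports are reduced to: p = "the previous element exists and equals 1"
def pvCnt (t : Nat) (p : Bool) : List Int → Int
  | [] => if p = false ∧ 0 = t then 1 else 0
  | x :: xs => (if p = false ∧ pvRunLen (x :: xs) = t then 1 else 0) + pvCnt t (decide (x = 1)) xs

-- window condition at start index i, B-side spec
def pvW (t : Nat) (p : Bool) (l : List Int) (i : Nat) : Bool :=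
  decide (pvOnes ((l.drop i).take t) = (t : Int))
  && (if i = 0 then !p else decide (l.getD (i - 1) 0 ≠ 1))
  && (decide (i + t = l.length) || decide (l.getD (i + t) 0 ≠ 1))

def pvCountW (t : Nat) (p : Bool) (l : List Int) : Int :=
  ((List.range (l.length + 1 - t)).countP (pvW t p l) : Int)

-- element-level recursion A's loop is reduced to
def pvFA (w : Int) : List Int → Int → Int
  | [], c => if c = w then 1 else 0
  | x :: xs, c => if x = 1 then pvFA w xs (c + 1) else (if c = w then 1 else 0) + pvFA w xs 0

theorem pvOnes_le_length : ∀ l : List Int, pvOnes l ≤ (l.length : Int) := by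
  intro l; induction l with
  | nil => simp [pvOnes]
  | cons x xs ih => simp only [pvOnes, pvD1, List.length_cons]; split_ifs <;> push_cast <;> omega

theorem pvOnes_append (a b : List Int) : pvOnes (a ++ b) = pvOnes a + pvOnes b := by
  induction a with
  | nil => simp [pvOnes]
  | cons x xs ih => simp only [List.cons_append, pvOnes, ih]; ring

theorem pvRunLen_le_length (l : List Int) : pvRunLen l ≤ l.length := by
  induction l with
  | nil => simp [pvRunLen]
  | cons x xs ih => simp only [pvRunLen, List.length_cons]; split_ifs <;> omega

-- pref characterization
theorem pvPsums_get (l : List Int) : ∀ (s : Int) (k : Nat), k ≤ l.length →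
    (s :: pvPsums s l)[k]? = some (s + pvOnes (l.take k)) := by
  induction l with
  | nil =>
    intro s k hk
    have : k = 0 := Nat.le_zero.mp hk
    subst this
    simp [pvOnes]
  | cons x xs ih =>
    intro s k hk
    cases k with
    | zero => simp [pvOnes]
    | succ j =>
      simp only [pvPsums, List.getElem?_cons_succ]
      have h := ih (s + pvD1 x) j (by simpa using hk)
      rw [h, List.take_succ_cons]
      simp only [pvOnes]
      congr 1
      ring

theorem pvPref_fold (l : List Int) : ∀ (a : List Int) (s : Int),
    l.foldl (fun pr x => pr ++ [PySem.List.pyGetD pr (-1) 0 + (if x = 1 then 1 else 0)]) (a ++ [s])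
      = (a ++ [s]) ++ pvPsums s l := by
  induction l with
  | nil => intro a s; simp [pvPsums]
  | cons x xs ih =>
    intro a s
    simp only [List.foldl_cons]
    rw [PySem.List.pyGetD_neg_one_append_singleton]
    have h1 : (a ++ [s]) ++ [s + (if x = 1 then 1 else 0)] = (a ++ [s]) ++ [s + pvD1 x] := rfl
    rw [h1, ih (a ++ [s]) (s + pvD1 x)]
    simp [pvPsums]

theorem pvPref_eq (line : List Int) : pvPref line = 0 :: pvPsums 0 line := by
  have := pvPref_fold line [] 0
  simpa [pvPref] using this

-- fold of the range loop is a countP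
theorem pvFoldl_count {α : Type} (P : α → Prop) [DecidablePred P] :
    ∀ (l : List α) (tot : Int),
      l.foldl (fun tot i => if P i then tot + 1 else tot) tot = tot + (l.countP (fun i => decide (P i)) : Int) := by
  intro l
  induction l with
  | nil => intro tot; simp
  | cons x xs ih =>
    intro tot
    simp only [List.foldl_cons, List.countP_cons, ih]
    by_cases h : P x
    · simp only [decide_eq_true_eq, if_pos h]
      push_cast
      ring
    · simp only [decide_eq_true_eq, if_neg h, add_zero]

-- B port equals pvCountW with p = false
theorem alt_eq_countW (word line : List Int) :
    is_include_word_in_line_alt word line = pvCountW word.length false line := by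
  unfold is_include_word_in_line_alt pvCountW
  dsimp only
  rw [pvPref_eq, PySem.List.pyRange_one, List.foldl_map, pvFoldl_count, zero_add]
  have hm : (((line.length : Int) - (word.length : Int) + 1 - 0)).toNat = line.length + 1 - word.length := by
    omega
  rw [hm]
  congr 1
  apply List.countP_congr
  intro k hk
  simp only [List.mem_range] at hk
  have hkt : k + word.length ≤ line.length := by omega
  rw [Bool.eq_iff_iff]
  simp only [decide_eq_true_eq]
  unfold pvW
  simp only [Bool.and_eq_true, Bool.or_eq_true, decide_eq_true_eq, iff_true, zero_add]
  have hcast : ((k : Int) + (word.length : Int)) = (((k + word.length : Nat)) : Int) := by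
    push_cast; ring
  have hp1 : PySem.List.pyGetD (0 :: pvPsums 0 line) ((k : Int) + (word.length : Int)) 0
      = pvOnes (line.take (k + word.length)) := by
    rw [hcast, PySem.List.pyGetD_natCast, List.getD_eq_getElem?_getD,
      pvPsums_get line 0 (k + word.length) hkt]
    simp
  have hp2 : PySem.List.pyGetD (0 :: pvPsums 0 line) (k : Int) 0 = pvOnes (line.take k) := by
    rw [PySem.List.pyGetD_natCast, List.getD_eq_getElem?_getD, pvPsums_get line 0 k (by omega)]
    simp
  have hsplit : pvOnes (line.take (k + word.length))
      = pvOnes (line.take k) + pvOnes ((line.drop k).take word.length) := by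
    rw [List.take_add, pvOnes_append]
  have hright : PySem.List.pyGetD line ((k : Int) + (word.length : Int)) 0
      = line.getD (k + word.length) 0 := by
    rw [hcast, PySem.List.pyGetD_natCast]
  have hleft : ((k : Int) = 0 ∨ PySem.List.pyGetD line ((k : Int) - 1) 0 ≠ 1) ↔
      ((if k = 0 then !false else decide (line.getD (k - 1) 0 ≠ 1)) = true) := by
    cases k with
    | zero => simp
    | succ j =>
      have h1 : ¬ (((j + 1 : Nat) : Int) = 0) := by omega
      have h2 : ((j + 1 : Nat) : Int) - 1 = (j : Int) := by push_cast; ring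
      simp [PySem.List.pyGetD_natCast]
      intro h
      omega
  rw [hp1, hp2, hright, hsplit]
  constructor
  · rintro ⟨h1, h2, h3⟩
    refine ⟨⟨by omega, hleft.mp h2⟩, ?_⟩
    rcases h3 with h3 | h3
    · exact Or.inl (by exact_mod_cast h3)
    · exact Or.inr h3
  · rintro ⟨⟨h1, h2⟩, h3⟩
    refine ⟨by omega, hleft.mpr h2, ?_⟩
    rcases h3 with h3 | h3
    · exact Or.inl (by exact_mod_cast h3)
    · exact Or.inr h3

theorem pvW_succ (t : Nat) (p : Bool) (x : Int) (xs : List Int) (i : Nat) :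
    pvW t p (x :: xs) (i + 1) = pvW t (decide (x = 1)) xs i := by
  unfold pvW
  rw [List.drop_succ_cons]
  have hlen : (i + 1 + t = (x :: xs).length) = (i + t = xs.length) := by
    rw [eq_iff_iff]; simp only [List.length_cons]; omega
  have hget : (x :: xs).getD (i + 1 + t) 0 = xs.getD (i + t) 0 := by
    rw [show i + 1 + t = (i + t) + 1 by omega, List.getD_cons_succ]
  have hleft : (if i + 1 = 0 then !p else decide ((x :: xs).getD (i + 1 - 1) 0 ≠ 1))
      = (if i = 0 then !(decide (x = 1)) else decide (xs.getD (i - 1) 0 ≠ 1)) := by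
    cases i with
    | zero => simp [decide_not]
    | succ j => simp
  simp only [hlen, hget, hleft]

theorem pvRunLen_iff : ∀ (l : List Int) (t : Nat), t ≤ l.length →
    (pvRunLen l = t ↔ (pvOnes (l.take t) = (t : Int) ∧ (t = l.length ∨ l.getD t 0 ≠ 1))) := by
  intro l
  induction l with
  | nil =>
    intro t ht
    have h0 : t = 0 := Nat.le_zero.mp ht
    subst h0
    simp [pvRunLen, pvOnes]
  | cons x xs ih =>
    intro t ht
    cases t with
    | zero =>
      by_cases hx : x = 1
      · simp [pvRunLen, hx, pvOnes]
      · simp [pvRunLen, hx, pvOnes]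
    | succ s =>
      simp only [pvRunLen, List.take_succ_cons, pvOnes, List.length_cons, List.getD_cons_succ]
      by_cases hx : x = 1
      · rw [if_pos hx]
        have hd : pvD1 x = 1 := by simp [pvD1, hx]
        rw [hd]
        have hih := ih s (by simpa using ht)
        constructor
        · intro h
          have hr : pvRunLen xs = s := by omega
          obtain ⟨h1, h2⟩ := hih.mp hr
          refine ⟨by rw [h1]; push_cast; ring, ?_⟩
          rcases h2 with h2 | h2
          · exact Or.inl (by omega)
          · exact Or.inr h2
        · rintro ⟨h1, h2⟩
          have h1' : pvOnes (xs.take s) = (s : Int) := by push_cast at h1 ⊢; omega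
          have h2' : s = xs.length ∨ xs.getD s 0 ≠ 1 := by
            rcases h2 with h2 | h2
            · exact Or.inl (by omega)
            · exact Or.inr h2
          have := hih.mpr ⟨h1', h2'⟩
          omega
      · rw [if_neg hx]
        have hd : pvD1 x = 0 := by simp [pvD1, hx]
        rw [hd]
        constructor
        · intro h; omega
        · rintro ⟨h1, -⟩
          exfalso
          have hle := pvOnes_le_length (xs.take s)
          have hlen : (xs.take s).length ≤ s := by simp
          have : ((xs.take s).length : Int) ≤ (s : Int) := by exact_mod_cast hlen
          push_cast at h1
          omega

theorem pvW_zero (t : Nat) (p : Bool) (l : List Int) (ht : t ≤ l.length) :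
    pvW t p l 0 = decide (p = false ∧ pvRunLen l = t) := by
  unfold pvW
  rw [Bool.eq_iff_iff]
  simp only [List.drop_zero, reduceIte, Nat.zero_add, Bool.and_eq_true, Bool.or_eq_true,
    Bool.not_eq_true', decide_eq_true_eq]
  rw [pvRunLen_iff l t ht]
  tauto

-- pvCountW equals pvCnt
theorem countW_eq_cnt (t : Nat) : ∀ (l : List Int) (p : Bool), pvCountW t p l = pvCnt t p l := by
  intro l
  induction l with
  | nil =>
    intro p
    unfold pvCountW pvCnt
    cases t with
    | zero => cases p <;> simp [pvW, pvOnes]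
    | succ s => simp
  | cons x xs ih =>
    intro p
    unfold pvCountW pvCnt
    by_cases ht : t ≤ xs.length + 1
    · have hr : (x :: xs).length + 1 - t = (xs.length + 1 - t) + 1 := by
        simp only [List.length_cons]; omega
      rw [hr, List.range_succ_eq_map]
      simp only [List.countP_cons, List.countP_map]
      rw [pvW_zero t p (x :: xs) (by simp only [List.length_cons]; omega)]
      have hsucc : (pvW t p (x :: xs)) ∘ Nat.succ = pvW t (decide (x = 1)) xs := by
        funext i; exact pvW_succ t p x xs i
      rw [hsucc]
      have hih := ih (decide (x = 1))
      unfold pvCountW at hih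
      push_cast
      rw [hih]
      by_cases hc : p = false ∧ pvRunLen (x :: xs) = t
      · simp [hc]; ring
      · simp [hc]
    · have h1 : (x :: xs).length + 1 - t = 0 := by simp only [List.length_cons]; omega
      have h2 : xs.length + 1 - t = 0 := by omega
      rw [h1, List.range_zero]
      have hih := ih (decide (x = 1))
      unfold pvCountW at hih
      rw [h2, List.range_zero] at hih
      simp only [List.countP_nil] at hih ⊢
      have hhead : ¬ (p = false ∧ pvRunLen (x :: xs) = t) := by
        rintro ⟨-, h⟩
        have := pvRunLen_le_length (x :: xs)
        simp only [List.length_cons] at this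
        omega
      simp [hhead, ← hih]

-- unlocking the first window turns p=false into p=true
theorem pvCnt_false (t : Nat) (l : List Int) :
    pvCnt t false l = (if pvRunLen l = t then 1 else 0) + pvCnt t true l := by
  cases l with
  | nil => simp [pvCnt, pvRunLen]
  | cons x xs => simp [pvCnt]

-- A's element recursion against pvCnt
theorem pvFA_eq_cnt (t : Nat) : ∀ (l : List Int) (c : Nat),
    pvFA (t : Int) l (c : Int) = (if c + pvRunLen l = t then 1 else 0) + pvCnt t true l := by
  intro l
  induction l with
  | nil =>
    intro c
    simp only [pvFA, pvRunLen, pvCnt]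
    by_cases h : c + 0 = t
    · rw [if_pos (show (c : Int) = (t : Int) by omega), if_pos h]
      simp
    · rw [if_neg (show ¬ (c : Int) = (t : Int) by omega), if_neg h]
      simp
  | cons x xs ih =>
    intro c
    by_cases hx : x = 1
    · simp only [pvFA, if_pos hx, pvRunLen, pvCnt]
      have h1 : (c : Int) + 1 = ((c + 1 : Nat) : Int) := by push_cast; ring
      rw [h1, ih (c + 1)]
      have hd : decide (x = 1) = true := by simp [hx]
      rw [hd]
      by_cases hc : c + 1 + pvRunLen xs = t
      · rw [if_pos hc, if_pos (show c + (pvRunLen xs + 1) = t by omega)]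
        simp
      · rw [if_neg hc, if_neg (show ¬ (c + (pvRunLen xs + 1) = t) by omega)]
        simp
    · simp only [pvFA, if_neg hx, pvRunLen, pvCnt]
      have ih0 := ih 0
      push_cast at ih0
      rw [ih0]
      have hd : decide (x = 1) = false := by simp [hx]
      rw [hd]
      have hfalse : pvCnt t false xs = (if pvRunLen xs = t then 1 else 0) + pvCnt t true xs :=
        pvCnt_false t xs
      rw [hfalse]
      by_cases hc : c + 0 = t
      · rw [if_pos (show (c : Int) = (t : Int) by omega), if_pos hc]
        simp
      · rw [if_neg (show ¬ (c : Int) = (t : Int) by omega), if_neg hc]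
        simp

theorem pvLoopA_step (word line : List Int) (i : Nat) (c p : Int) (h : i < line.length) :
    pvLoopA word line i c p =
      pvLoopA word line (i + 1)
        (if (line)[i] = 1 then c + 1 else 0)
        (if i = line.length - 1 ∧ (if (line)[i] = 1 then c + 1 else 0) = (word.length : Int)
         then (if (line)[i] = 1 then p else if c = (word.length : Int) then p + 1 else p) + 1
         else (if (line)[i] = 1 then p else if c = (word.length : Int) then p + 1 else p)) := by
  rw [pvLoopA, dif_pos h]

theorem pvLoopA_eq (word line : List Int) :
    ∀ d i (c p : Int), line.length - i = d → i < line.length →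
      pvLoopA word line i c p = p + pvFA (word.length : Int) (line.drop i) c := by
  intro d
  induction d using Nat.strong_induction_on with
  | _ d ih =>
    intro i c p hd hi
    rw [pvLoopA_step word line i c p hi, List.drop_eq_getElem_cons hi]
    by_cases hx : (line)[i] = 1
    · simp only [if_pos hx, pvFA]
      by_cases hlast : i + 1 < line.length
      · have hnl : ¬ i = line.length - 1 := by omega
        rw [if_neg (fun hc => hnl hc.1)]
        exact ih (d - 1) (by omega) (i + 1) (c + 1) p (by omega) hlast
      · have hnil : line.drop (i + 1) = [] := List.drop_of_length_le (by omega)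
        rw [pvLoopA, dif_neg (by omega), hnil]
        simp only [pvFA]
        have hl : i = line.length - 1 := by omega
        by_cases hc : c + 1 = (word.length : Int)
        · rw [if_pos ⟨hl, hc⟩, if_pos hc]
        · rw [if_neg (fun hcc => hc hcc.2), if_neg hc]
          omega
    · simp only [if_neg hx, pvFA]
      by_cases hlast : i + 1 < line.length
      · have hnl : ¬ i = line.length - 1 := by omega
        rw [if_neg (fun hc => hnl hc.1)]
        rw [ih (d - 1) (by omega) (i + 1) 0 _ (by omega) hlast]
        split_ifs <;> ring
      · have hnil : line.drop (i + 1) = [] := List.drop_of_length_le (by omega)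
        rw [pvLoopA, dif_neg (by omega), hnil]
        simp only [pvFA]
        have hl : i = line.length - 1 := by omega
        simp only [hl, true_and]
        split_ifs <;> ring

-- ===== VERDICT (by name: the statement is the Claim_ definition above) =====
theorem is_include_word_in_line_spec : Claim_equal_is_include_word_in_line := by
  intro word line _ hpre
  unfold Spec_is_include_word_in_line
  rw [alt_eq_countW, countW_eq_cnt]
  unfold is_include_word_in_line
  cases line with
  | nil =>
    rw [pvLoopA, dif_neg (by simp)]
    have hw : word ≠ [] := fun h => hpre ⟨h, rfl⟩
    have ht : ¬ (0 = word.length) := by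
      cases word with
      | nil => exact absurd rfl hw
      | cons a l => simp
    simp [pvCnt, ht]
  | cons y ys =>
    have hlt : 0 < (y :: ys).length := by simp
    rw [pvLoopA_eq word (y :: ys) ((y :: ys).length - 0) 0 0 0 rfl hlt]
    have hfa := pvFA_eq_cnt word.length (y :: ys) 0
    push_cast at hfa
    simp only [List.drop_zero, zero_add]
    rw [hfa, pvCnt_false]
    simp only [Nat.zero_add]
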